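-- pv_equiv track=rewrite | github.com/KarthikeyaRavirala/Portfolio-Advanced | ai-lab/portfolio-chatbot/api.py | simulate_llm_response
-- ===== SOURCE A (Python) =====
-- from typing import List, Dict, Optional
--
-- def simulate_llm_response(prompt: str, context_chunks: List[Dict]) -> str:
--     """Simulate an LLM response based on context (in a real implementation, this would call an LLM API)."""
--     # Extract key information from context
--     projects = []
--     skills = []
--     experience = []
--
--     for chunk in context_chunks:
--         text = chunk["text"].lower()
--         if "project" in text or "anurag-gpt" in text or "smart cam" in text:
--             projects.append(chunk["text"])
--         elif "skill" in text or "python" in text or "tensorflow" in text or "pytorch" in text: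
--             skills.append(chunk["text"])
--         elif "experience" in text or "engineer" in text:
--             experience.append(chunk["text"])
--
--     # Generate a response based on the detected content
--     if projects:
--         project_info = " and ".join([p[:100] + "..." for p in projects])
--         return f"I can tell you about my projects. For example: {project_info} For more details about my projects, feel free to ask specific questions!"
--
--     elif skills:
--         return "I have expertise in various technologies including Python, TensorFlow, PyTorch, React, Next.js, TypeScript, and more. My focus is on AI/ML development, particularly in LLMs, NLP, and computer vision."
--
--     elif experience:
--         exp_info = " and ".join([e[:100] + "..." for e in experience])
--         return f"Regarding my experience: {exp_info} I specialize in building AI-powered applications and have experience with full-stack development."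
--
--     else:
--         return "I'm Karthikeya Ravirala, an AI Engineer & Tech Creator. I specialize in transforming complex technological concepts into practical, real-world solutions. I have expertise in machine learning, computer vision, and natural language processing. Feel free to ask me about my projects, skills, or experience!"
-- ===== SOURCE B (Python) =====
-- from typing import List, Dict
--
-- def simulate_llm_response(prompt: str, context_chunks: List[Dict]) -> str:
--     """Priority-ordered category table: first category with any keyword match wins."""
--     def join_trunc(ms):
--         return " and ".join(m[:100] + "..." for m in ms)
--     categories = [
--         (("project", "anurag-gpt", "smart cam"),
--          lambda ms: f"I can tell you about my projects. For example: {join_trunc(ms)} For more details about my projects, feel free to ask specific questions!"),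
--         (("skill", "python", "tensorflow", "pytorch"),
--          lambda ms: "I have expertise in various technologies including Python, TensorFlow, PyTorch, React, Next.js, TypeScript, and more. My focus is on AI/ML development, particularly in LLMs, NLP, and computer vision."),
--         (("experience", "engineer"),
--          lambda ms: f"Regarding my experience: {join_trunc(ms)} I specialize in building AI-powered applications and have experience with full-stack development."),
--     ]
--     for keywords, build in categories:
--         matches = [c["text"] for c in context_chunks
--                    if any(k in c["text"].lower() for k in keywords)]
--         if matches:
--             return build(matches)
--     return "I'm Karthikeya Ravirala, an AI Engineer & Tech Creator. I specialize in transforming complex technological concepts into practical, real-world solutions. I have expertise in machine learning, computer vision, and natural language processing. Feel free to ask me about my projects, skills, or experience!"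
-- ===== Notes on version B (the rewrite author's own statement) =====
-- stated objective: simpler
-- what changed: Replaced the single three-bucket elif classification loop plus a separate if/elif response chain by a priority-ordered table of (keywords, response-builder) categories, searched for the first category whose keyword set matches any chunk.
import Mathlib
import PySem

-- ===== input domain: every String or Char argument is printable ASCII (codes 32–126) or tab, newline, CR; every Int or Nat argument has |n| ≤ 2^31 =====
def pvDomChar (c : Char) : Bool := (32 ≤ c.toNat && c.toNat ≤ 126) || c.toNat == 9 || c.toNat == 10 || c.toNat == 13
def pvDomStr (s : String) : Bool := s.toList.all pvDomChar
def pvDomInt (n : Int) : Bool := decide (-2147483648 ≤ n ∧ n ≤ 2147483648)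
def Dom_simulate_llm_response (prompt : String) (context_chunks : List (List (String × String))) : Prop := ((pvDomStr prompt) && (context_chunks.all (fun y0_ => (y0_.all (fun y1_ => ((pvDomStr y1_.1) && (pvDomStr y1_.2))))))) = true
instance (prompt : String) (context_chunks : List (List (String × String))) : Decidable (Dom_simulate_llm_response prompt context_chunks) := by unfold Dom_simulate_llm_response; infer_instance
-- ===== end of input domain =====

-- B replaces A's single three-bucket elif loop by a priority-ordered category table searched
-- for the first category with a matching chunk (objective: simpler decomposition, same cost).


-- ===== PORT A =====
-- chunk["text"]: assoc-list lookup, first match; none = KeyError, excluded by Pre_ (getD "" is never read there)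
def pvTextOf (chunk : List (String × String)) : String :=
  ((chunk.find? (fun p => p.1 == "text")).map (·.2)).getD ""

-- p[:100] + "..."
def pvTrunc (p : String) : String := PySem.Str.slice p none (some 100) ++ "..."

def simulate_llm_response (prompt : String) (context_chunks : List (List (String × String))) : String :=
  let acc := context_chunks.foldl
    (fun (acc : List String × List String × List String) chunk =>
      let (projects, skills, experience) := acc
      let text := PySem.Str.lower (pvTextOf chunk)
      if PySem.Str.isIn "project" text || PySem.Str.isIn "anurag-gpt" text || PySem.Str.isIn "smart cam" text then
        (projects ++ [pvTextOf chunk], skills, experience)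
      else if PySem.Str.isIn "skill" text || PySem.Str.isIn "python" text || PySem.Str.isIn "tensorflow" text || PySem.Str.isIn "pytorch" text then
        (projects, skills ++ [pvTextOf chunk], experience)
      else if PySem.Str.isIn "experience" text || PySem.Str.isIn "engineer" text then
        (projects, skills, experience ++ [pvTextOf chunk])
      else
        (projects, skills, experience))
    ([], [], [])
  let projects := acc.1
  let skills := acc.2.1
  let experience := acc.2.2
  if projects ≠ [] then
    let project_info := PySem.Str.join " and " (projects.map pvTrunc)
    "I can tell you about my projects. For example: " ++ project_info ++ " For more details about my projects, feel free to ask specific questions!"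
  else if skills ≠ [] then
    "I have expertise in various technologies including Python, TensorFlow, PyTorch, React, Next.js, TypeScript, and more. My focus is on AI/ML development, particularly in LLMs, NLP, and computer vision."
  else if experience ≠ [] then
    let exp_info := PySem.Str.join " and " (experience.map pvTrunc)
    "Regarding my experience: " ++ exp_info ++ " I specialize in building AI-powered applications and have experience with full-stack development."
  else
    "I'm Karthikeya Ravirala, an AI Engineer & Tech Creator. I specialize in transforming complex technological concepts into practical, real-world solutions. I have expertise in machine learning, computer vision, and natural language processing. Feel free to ask me about my projects, skills, or experience!"

-- ===== PORT B =====
def pvJoinTrunc (ms : List String) : String :=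
  PySem.Str.join " and " (ms.map (fun m => PySem.Str.slice m none (some 100) ++ "..."))

def pvCategories : List (List String × (List String → String)) :=
  [ (["project", "anurag-gpt", "smart cam"],
      fun ms => "I can tell you about my projects. For example: " ++ pvJoinTrunc ms ++ " For more details about my projects, feel free to ask specific questions!"),
    (["skill", "python", "tensorflow", "pytorch"],
      fun _ => "I have expertise in various technologies including Python, TensorFlow, PyTorch, React, Next.js, TypeScript, and more. My focus is on AI/ML development, particularly in LLMs, NLP, and computer vision."),
    (["experience", "engineer"],
      fun ms => "Regarding my experience: " ++ pvJoinTrunc ms ++ " I specialize in building AI-powered applications and have experience with full-stack development.") ]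

def pvFirstMatch (cats : List (List String × (List String → String))) (context_chunks : List (List (String × String))) : String :=
  match cats with
  | [] => "I'm Karthikeya Ravirala, an AI Engineer & Tech Creator. I specialize in transforming complex technological concepts into practical, real-world solutions. I have expertise in machine learning, computer vision, and natural language processing. Feel free to ask me about my projects, skills, or experience!"
  | (keywords, build) :: rest =>
      let ms := (context_chunks.filter
        (fun c => keywords.any (fun k => PySem.Str.isIn k (PySem.Str.lower (pvTextOf c))))).map pvTextOf
      if ms ≠ [] then build ms else pvFirstMatch rest context_chunks

def simulate_llm_response_alt (prompt : String) (context_chunks : List (List (String × String))) : String :=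
  pvFirstMatch pvCategories context_chunks

-- ===== PRECONDITION & SPEC =====
-- Pre_ excludes chunks missing the "text" key, on which Python A raises KeyError.
def Pre_simulate_llm_response (prompt : String) (context_chunks : List (List (String × String))) : Prop :=
  context_chunks.all (fun c => c.any (fun p => p.1 == "text")) = true
instance (prompt : String) (context_chunks : List (List (String × String))) : Decidable (Pre_simulate_llm_response prompt context_chunks) := by unfold Pre_simulate_llm_response; infer_instance

def pvWitness_simulate_llm_response : String × (List (List (String × String))) :=
  ("hi", [[("text", "I love Python")]])

def Spec_simulate_llm_response (prompt : String) (context_chunks : List (List (String × String))) (out : String) : Prop := out = simulate_llm_response_alt prompt context_chunks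
instance (prompt : String) (context_chunks : List (List (String × String))) (out : String) : Decidable (Spec_simulate_llm_response prompt context_chunks out) := by unfold Spec_simulate_llm_response; infer_instance

-- ===== CLAIM (what is proved, stated in full; the proofs are below) =====
def Claim_equal_simulate_llm_response : Prop := ∀ (prompt : String) (context_chunks : List (List (String × String))), Dom_simulate_llm_response prompt context_chunks → Pre_simulate_llm_response prompt context_chunks → Spec_simulate_llm_response prompt context_chunks (simulate_llm_response prompt context_chunks)

-- ===== LEMMAS AND PROOFS =====
def pvP (c : List (String × String)) : Bool :=
  let t := PySem.Str.lower (pvTextOf c)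
  PySem.Str.isIn "project" t || PySem.Str.isIn "anurag-gpt" t || PySem.Str.isIn "smart cam" t

def pvS (c : List (String × String)) : Bool :=
  let t := PySem.Str.lower (pvTextOf c)
  PySem.Str.isIn "skill" t || PySem.Str.isIn "python" t || PySem.Str.isIn "tensorflow" t || PySem.Str.isIn "pytorch" t

def pvE (c : List (String × String)) : Bool :=
  let t := PySem.Str.lower (pvTextOf c)
  PySem.Str.isIn "experience" t || PySem.Str.isIn "engineer" t

def pvStepA (acc : List String × List String × List String) (chunk : List (String × String)) :
    List String × List String × List String :=
  if pvP chunk then (acc.1 ++ [pvTextOf chunk], acc.2.1, acc.2.2)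
  else if pvS chunk then (acc.1, acc.2.1 ++ [pvTextOf chunk], acc.2.2)
  else if pvE chunk then (acc.1, acc.2.1, acc.2.2 ++ [pvTextOf chunk])
  else acc

theorem pvStepA_eq :
    (fun (acc : List String × List String × List String) chunk =>
      let (projects, skills, experience) := acc
      let text := PySem.Str.lower (pvTextOf chunk)
      if PySem.Str.isIn "project" text || PySem.Str.isIn "anurag-gpt" text || PySem.Str.isIn "smart cam" text then
        (projects ++ [pvTextOf chunk], skills, experience)
      else if PySem.Str.isIn "skill" text || PySem.Str.isIn "python" text || PySem.Str.isIn "tensorflow" text || PySem.Str.isIn "pytorch" text then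
        (projects, skills ++ [pvTextOf chunk], experience)
      else if PySem.Str.isIn "experience" text || PySem.Str.isIn "engineer" text then
        (projects, skills, experience ++ [pvTextOf chunk])
      else
        (projects, skills, experience)) = pvStepA := by
  funext acc chunk
  rcases acc with ⟨ps, ss, es⟩
  rfl

-- A's loop characterised: three independent filters
theorem pvLoopA (l : List (List (String × String))) (ps ss es : List String) :
    l.foldl pvStepA (ps, ss, es)
    = (ps ++ (l.filter pvP).map pvTextOf,
       ss ++ (l.filter (fun c => !pvP c && pvS c)).map pvTextOf,
       es ++ (l.filter (fun c => !pvP c && !pvS c && pvE c)).map pvTextOf) := by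
  induction l generalizing ps ss es with
  | nil => simp
  | cons c l ih =>
    simp only [List.foldl_cons, List.filter_cons, pvStepA]
    cases hpc : pvP c
    · cases hsc : pvS c
      · cases hec : pvE c
        · simp [ih]
        · simp [ih]
      · simp [ih]
    · simp [ih]

theorem pvCatMatch_p (l : List (List (String × String))) :
    l.filter (fun c => (["project", "anurag-gpt", "smart cam"] : List String).any
        (fun k => PySem.Str.isIn k (PySem.Str.lower (pvTextOf c)))) = l.filter pvP := by
  apply List.filter_congr
  intro c _
  simp [pvP, Bool.or_assoc]

theorem pvCatMatch_s (l : List (List (String × String))) :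
    l.filter (fun c => (["skill", "python", "tensorflow", "pytorch"] : List String).any
        (fun k => PySem.Str.isIn k (PySem.Str.lower (pvTextOf c)))) = l.filter pvS := by
  apply List.filter_congr
  intro c _
  simp [pvS, Bool.or_assoc]

theorem pvCatMatch_e (l : List (List (String × String))) :
    l.filter (fun c => (["experience", "engineer"] : List String).any
        (fun k => PySem.Str.isIn k (PySem.Str.lower (pvTextOf c)))) = l.filter pvE := by
  apply List.filter_congr
  intro c _
  simp [pvE]

-- ===== VERDICT (by name: the statement is the Claim_ definition above) =====
theorem simulate_llm_response_spec : Claim_equal_simulate_llm_response := by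
  intro prompt chunks _ _
  show simulate_llm_response prompt chunks = simulate_llm_response_alt prompt chunks
  unfold simulate_llm_response simulate_llm_response_alt
  rw [pvStepA_eq, pvLoopA]
  simp only [List.nil_append, pvFirstMatch, pvCategories, pvCatMatch_p, pvCatMatch_s, pvCatMatch_e]
  by_cases hp : chunks.filter pvP = []
  · have hpall : ∀ c ∈ chunks, pvP c = false := by
      simpa [List.filter_eq_nil_iff] using hp
    have hsf : chunks.filter (fun c => !pvP c && pvS c) = chunks.filter pvS := by
      apply List.filter_congr; intro c hc; simp [hpall c hc]
    by_cases hs : chunks.filter pvS = []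
    · have hsall : ∀ c ∈ chunks, pvS c = false := by
        simpa [List.filter_eq_nil_iff] using hs
      have hef : chunks.filter (fun c => !pvP c && !pvS c && pvE c) = chunks.filter pvE := by
        apply List.filter_congr; intro c hc; simp [hpall c hc, hsall c hc]
      simp [hp, hsf, hs, hef, pvJoinTrunc, List.map_map, Function.comp_def, pvTrunc]
    · simp [hp, hsf, hs]
  · simp [hp, pvJoinTrunc, List.map_map, Function.comp_def, pvTrunc]
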